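-- pv_equiv track=rewrite | github.com/stefanidimitrova31/Horse-Blinkrate-Detection | horseblink_improved_v2_OTA.py | createBinary
-- ===== SOURCE A (Python) =====
-- def createBinary(framenumber, blinkStartFrame, blinkStopFrame):
--     binarySignal = []
--     for n in range(0, len(framenumber)):
--         binarySignal.append(0)
--         for m in range(0, len(blinkStartFrame)):
--             if n >= blinkStartFrame[m] and n <= blinkStopFrame[m]:
--                 binarySignal.pop()
--                 binarySignal.append(1)
--
--     return binarySignal
-- ===== SOURCE B (Python) =====
-- def createBinary(framenumber, blinkStartFrame, blinkStopFrame):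
--     n = len(framenumber)
--     diff = [0] * (n + 1)
--     for s, e in zip(blinkStartFrame, blinkStopFrame):
--         lo = max(s, 0)
--         hi = min(e, n - 1)
--         if lo <= hi:
--             diff[lo] += 1
--             diff[hi + 1] -= 1
--     out = []
--     running = 0
--     for d in diff[:n]:
--         running += d
--         out.append(1 if running > 0 else 0)
--     return out
-- ===== Notes on version B (the rewrite author's own statement) =====
-- stated objective: faster
-- what changed: Replaces the nested per-frame scan over all intervals by a difference array (+1 at clamped start, -1 after clamped stop) followed by one prefix-sum pass.
import Mathlib
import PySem

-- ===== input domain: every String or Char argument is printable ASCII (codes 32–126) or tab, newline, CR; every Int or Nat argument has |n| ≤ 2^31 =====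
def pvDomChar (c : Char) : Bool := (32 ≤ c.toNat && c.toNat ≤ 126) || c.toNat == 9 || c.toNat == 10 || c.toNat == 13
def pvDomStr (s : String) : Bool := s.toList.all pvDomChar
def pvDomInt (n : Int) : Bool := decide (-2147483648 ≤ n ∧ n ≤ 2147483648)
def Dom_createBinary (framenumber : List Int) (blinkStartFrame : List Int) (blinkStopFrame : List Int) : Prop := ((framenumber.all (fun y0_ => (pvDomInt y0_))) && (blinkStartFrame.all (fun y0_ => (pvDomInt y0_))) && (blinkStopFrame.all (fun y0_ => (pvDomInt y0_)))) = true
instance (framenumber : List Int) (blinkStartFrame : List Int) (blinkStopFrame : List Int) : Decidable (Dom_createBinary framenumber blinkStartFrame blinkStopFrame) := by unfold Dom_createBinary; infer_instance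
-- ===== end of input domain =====

-- B replaces A's O(N*M) nested per-frame interval scan by an O(N+M) difference array with one prefix-sum pass (same return value; measured faster).

-- ===== PORT A =====
def createBinary (framenumber : List Int) (blinkStartFrame : List Int) (blinkStopFrame : List Int) : List Int :=
  (PySem.List.pyRange 0 framenumber.length 1).foldl (fun sig n =>
    let sig := sig ++ [0]
    (PySem.List.pyRange 0 blinkStartFrame.length 1).foldl (fun sig m =>
      match PySem.List.pyGet? blinkStartFrame m with
      | none => sig            -- unreachable: m ranges over valid indices
      | some s =>
        if s ≤ n then
          match PySem.List.pyGet? blinkStopFrame m with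
          | none => sig        -- Python raises IndexError here; excluded by Pre_
          | some e => if n ≤ e then sig.dropLast ++ [1] else sig
        else sig) sig) []

-- ===== PORT B =====
def createBinary_alt (framenumber : List Int) (blinkStartFrame : List Int) (blinkStopFrame : List Int) : List Int :=
  let n := framenumber.length
  let diff := (blinkStartFrame.zip blinkStopFrame).foldl (fun diff p =>
    let lo := max p.1 0
    let hi := min p.2 ((n : Int) - 1)
    if lo ≤ hi then
      let diff := diff.set lo.toNat (diff.getD lo.toNat 0 + 1)
      diff.set (hi + 1).toNat (diff.getD (hi + 1).toNat 0 - 1)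
    else diff) (List.replicate (n + 1) (0 : Int))
  ((diff.take n).foldl
    (fun a d => (a.1 + d, a.2 ++ [if a.1 + d > 0 then (1 : Int) else 0]))
    ((0 : Int), ([] : List Int))).2

-- ===== PRECONDITION & SPEC =====
-- Pre_ excludes exactly the inputs where A raises IndexError: blinkStopFrame shorter than
-- blinkStartFrame while some frame index n reaches an unpaired start (n >= blinkStartFrame[m]).
def Pre_createBinary (framenumber : List Int) (blinkStartFrame : List Int) (blinkStopFrame : List Int) : Prop :=
  framenumber.length = 0 ∨
    ∀ m : Nat, m < blinkStartFrame.length → blinkStopFrame.length ≤ m →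
      (framenumber.length : Int) ≤ blinkStartFrame.getD m 0
instance (framenumber : List Int) (blinkStartFrame : List Int) (blinkStopFrame : List Int) : Decidable (Pre_createBinary framenumber blinkStartFrame blinkStopFrame) := by unfold Pre_createBinary; infer_instance
def pvWitness_createBinary : List Int × List Int × List Int := ([0, 0, 0, 0], [1, 5], [2, 5])

def Spec_createBinary (framenumber : List Int) (blinkStartFrame : List Int) (blinkStopFrame : List Int) (out : List Int) : Prop := out = createBinary_alt framenumber blinkStartFrame blinkStopFrame
instance (framenumber : List Int) (blinkStartFrame : List Int) (blinkStopFrame : List Int) (out : List Int) : Decidable (Spec_createBinary framenumber blinkStartFrame blinkStopFrame out) := by unfold Spec_createBinary; infer_instance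

-- ===== CLAIM (what is proved, stated in full; the proofs are below) =====
def Claim_equal_createBinary : Prop := ∀ (framenumber : List Int) (blinkStartFrame : List Int) (blinkStopFrame : List Int), Dom_createBinary framenumber blinkStartFrame blinkStopFrame → Pre_createBinary framenumber blinkStartFrame blinkStopFrame → Spec_createBinary framenumber blinkStartFrame blinkStopFrame (createBinary framenumber blinkStartFrame blinkStopFrame)
-- ===== LEMMAS AND PROOFS =====

-- A's inner-loop match condition for frame index n and interval index m
def condA (bs be : List Int) (n m : Int) : Bool :=
  match PySem.List.pyGet? bs m with
  | none => false
  | some s =>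
    if s ≤ n then
      match PySem.List.pyGet? be m with
      | none => false
      | some e => decide (n ≤ e)
    else false

-- "frame n lies in some (start, stop) pair"
def zipHit (bs be : List Int) (n : Int) : Bool :=
  (bs.zip be).any (fun p => decide (p.1 ≤ n ∧ n ≤ p.2))

theorem innerA (bs be : List Int) (n : Int) (ms : List Int) :
    ∀ (sig : List Int) (x : Int),
    ms.foldl (fun sig m =>
      match PySem.List.pyGet? bs m with
      | none => sig
      | some s =>
        if s ≤ n then
          match PySem.List.pyGet? be m with
          | none => sig
          | some e => if n ≤ e then sig.dropLast ++ [1] else sig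
        else sig) (sig ++ [x])
    = sig ++ [if ms.any (condA bs be n) then 1 else x] := by
  induction ms with
  | nil => intro sig x; simp
  | cons m ms ih =>
    intro sig x
    simp only [List.foldl_cons, List.any_cons]
    have hstep : (match PySem.List.pyGet? bs m with
      | none => sig ++ [x]
      | some s =>
        if s ≤ n then
          match PySem.List.pyGet? be m with
          | none => sig ++ [x]
          | some e => if n ≤ e then (sig ++ [x]).dropLast ++ [1] else sig ++ [x]
        else sig ++ [x]) = sig ++ [if condA bs be n m then 1 else x] := by
      unfold condA
      cases hbs : PySem.List.pyGet? bs m with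
      | none => simp
      | some s =>
        by_cases hs : s ≤ n
        · cases hbe : PySem.List.pyGet? be m with
          | none => simp [hs]
          | some e =>
            by_cases he : n ≤ e
            · simp [hs, he]
            · simp [hs, he]
        · simp [hs]
    rw [hstep, ih]
    by_cases h1 : condA bs be n m <;> by_cases h2 : ms.any (condA bs be n) <;>
      simp [h1, h2]

theorem outerA (bs be : List Int) (L : List Int) :
    ∀ acc : List Int,
    L.foldl (fun sig n =>
      (PySem.List.pyRange 0 bs.length 1).foldl (fun sig m =>
        match PySem.List.pyGet? bs m with
        | none => sig
        | some s =>
          if s ≤ n then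
            match PySem.List.pyGet? be m with
            | none => sig
            | some e => if n ≤ e then sig.dropLast ++ [1] else sig
          else sig) (sig ++ [0])) acc
    = acc ++ L.map (fun n =>
        if (PySem.List.pyRange 0 bs.length 1).any (condA bs be n) then 1 else 0) := by
  induction L with
  | nil => intro acc; simp
  | cons n L ih =>
    intro acc
    simp only [List.foldl_cons, List.map_cons]
    rw [innerA, ih, List.append_assoc]
    rfl

theorem A_eq_map (fn bs be : List Int) :
    createBinary fn bs be = (PySem.List.pyRange 0 fn.length 1).map (fun n =>
      if (PySem.List.pyRange 0 bs.length 1).any (condA bs be n) then 1 else 0) := by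
  unfold createBinary
  rw [outerA]
  rfl

theorem condA_nil (bs : List Int) (n m : Int) : condA bs [] n m = false := by
  unfold condA
  cases hbs : PySem.List.pyGet? bs m with
  | none => rfl
  | some s =>
    by_cases hs : s ≤ n <;> simp [hs, PySem.List.pyGet?]

theorem anyA_range (n : Int) :
    ∀ (bs be : List Int),
      (List.range bs.length).any (fun k => condA bs be n (k : Int)) = zipHit bs be n := by
  intro bs
  induction bs with
  | nil => intro be; simp [zipHit]
  | cons s bs ih =>
    intro be
    rw [List.length_cons, List.range_succ_eq_map]
    simp only [List.any_cons, List.any_map, Function.comp_def]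
    cases be with
    | nil =>
      simp [condA_nil, zipHit]
    | cons e be =>
      have h0 : condA (s :: bs) (e :: be) n ((0 : Nat) : Int)
          = decide (s ≤ n ∧ n ≤ e) := by
        unfold condA
        rw [show ((0 : Nat) : Int) = 0 by norm_num]
        rw [PySem.List.pyGet?_zero_cons, PySem.List.pyGet?_zero_cons]
        by_cases hs : s ≤ n <;> simp [hs]
      have hsucc : ∀ k : Nat, condA (s :: bs) (e :: be) n ((k.succ : Nat) : Int)
          = condA bs be n (k : Int) := by
        intro k
        unfold condA
        rw [show ((k.succ : Nat) : Int) = (k : Int) + 1 by push_cast; ring]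
        rw [PySem.List.pyGet?_cons_succ, PySem.List.pyGet?_cons_succ]
      simp only [hsucc]
      rw [h0, ih]
      simp [zipHit]

theorem sum_take_set_add :
    ∀ (d : List Int) (i m : Nat) (x : Int),
    ((d.set i (d.getD i 0 + x)).take m).sum
      = (d.take m).sum + if i < m ∧ i < d.length then x else 0 := by
  intro d
  induction d with
  | nil => intro i m x; simp
  | cons a d ih =>
    intro i m x
    cases i with
    | zero =>
      cases m with
      | zero => simp
      | succ m =>
        simp [List.getD]
        ring
    | succ i =>
      cases m with
      | zero => simp
      | succ m =>
        simp only [List.set_cons_succ, List.take_succ_cons, List.sum_cons,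
          List.getD_cons_succ, List.length_cons]
        rw [ih]
        by_cases h : i < m ∧ i < d.length
        · rw [if_pos h, if_pos (by omega)]; ring
        · rw [if_neg h, if_neg (by omega)]; ring

theorem diffB (N : Nat) :
    ∀ (ps : List (Int × Int)) (d : List Int), d.length = N + 1 →
    (ps.foldl (fun diff p =>
        let lo := max p.1 0
        let hi := min p.2 ((N : Int) - 1)
        if lo ≤ hi then
          let diff := diff.set lo.toNat (diff.getD lo.toNat 0 + 1)
          diff.set (hi + 1).toNat (diff.getD (hi + 1).toNat 0 - 1)
        else diff) d).length = N + 1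
    ∧ ∀ k : Nat, k < N →
      ((ps.foldl (fun diff p =>
        let lo := max p.1 0
        let hi := min p.2 ((N : Int) - 1)
        if lo ≤ hi then
          let diff := diff.set lo.toNat (diff.getD lo.toNat 0 + 1)
          diff.set (hi + 1).toNat (diff.getD (hi + 1).toNat 0 - 1)
        else diff) d).take (k + 1)).sum
        = (d.take (k + 1)).sum
          + (ps.countP (fun p =>
              decide (max p.1 0 ≤ (k : Int) ∧ (k : Int) ≤ min p.2 ((N : Int) - 1))) : Int) := by
  intro ps
  induction ps with
  | nil => intro d hd; exact ⟨hd, by intro k _; simp⟩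
  | cons p ps ih =>
    intro d hd
    simp only [List.foldl_cons]
    set lo := max p.1 0 with hlo
    set hi := min p.2 ((N : Int) - 1) with hhi
    have hlo0 : 0 ≤ lo := le_max_right _ _
    have hhiN : hi ≤ (N : Int) - 1 := min_le_right _ _
    by_cases hcl : lo ≤ hi
    · have hd1 : (d.set lo.toNat (d.getD lo.toNat 0 + 1)).length = N + 1 := by
        rw [List.length_set]; exact hd
      have hd2 : ((d.set lo.toNat (d.getD lo.toNat 0 + 1)).set (hi + 1).toNat
          ((d.set lo.toNat (d.getD lo.toNat 0 + 1)).getD (hi + 1).toNat 0 - 1)).length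
          = N + 1 := by
        rw [List.length_set]; exact hd1
      obtain ⟨hlen, hsum⟩ := ih _ hd2
      refine ⟨by simpa [hcl] using hlen, ?_⟩
      intro k hk
      have hmain := hsum k hk
      simp only [if_pos hcl]
      rw [show ((d.set lo.toNat (d.getD lo.toNat 0 + 1)).getD (hi + 1).toNat 0 - 1)
          = ((d.set lo.toNat (d.getD lo.toNat 0 + 1)).getD (hi + 1).toNat 0 + (-1)) by ring] at hmain ⊢
      rw [hmain, sum_take_set_add, sum_take_set_add, List.countP_cons]
      have hcond : (decide (max p.1 0 ≤ (k : Int) ∧ (k : Int) ≤ min p.2 ((N : Int) - 1)) = true)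
          ↔ (lo ≤ (k : Int) ∧ (k : Int) ≤ hi) := by
        rw [← hlo, ← hhi]; simp
      rw [hd]
      by_cases hin : lo ≤ (k : Int) ∧ (k : Int) ≤ hi
      · rw [if_pos (by omega), if_neg (by omega)]
        have : (decide (max p.1 0 ≤ (k : Int) ∧ (k : Int) ≤ min p.2 ((N : Int) - 1))) = true := by
          rw [hcond]; exact hin
        rw [this]
        simp
        try push_cast
        try ring
      · have hdecf : (decide (max p.1 0 ≤ (k : Int) ∧ (k : Int) ≤ min p.2 ((N : Int) - 1))) = false := by
          rw [← Bool.not_eq_true, hcond]; exact hin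
        rw [hdecf]
        by_cases hlok : lo ≤ (k : Int)
        · rw [if_pos (by omega), if_pos (by omega)]
          simp
          try push_cast
          try ring
        · rw [if_neg (by omega), if_neg (by omega)]
          simp
          try push_cast
          try ring
    · obtain ⟨hlen, hsum⟩ := ih _ hd
      refine ⟨by simpa [hcl] using hlen, ?_⟩
      intro k hk
      simp only [if_neg hcl]
      rw [hsum k hk, List.countP_cons]
      have hdecf : (decide (max p.1 0 ≤ (k : Int) ∧ (k : Int) ≤ min p.2 ((N : Int) - 1))) = false := by
        rw [← hlo, ← hhi]
        simp only [decide_eq_false_iff_not]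
        intro ⟨h1, h2⟩; exact hcl (le_trans h1 h2)
      rw [hdecf]
      simp

theorem scanB :
    ∀ (d : List Int) (r : Int) (acc : List Int),
    (d.foldl (fun a d => (a.1 + d, a.2 ++ [if a.1 + d > 0 then (1 : Int) else 0])) (r, acc)).2
    = acc ++ (List.range d.length).map
        (fun k => if r + ((d.take (k + 1)).sum) > 0 then (1 : Int) else 0) := by
  intro d
  induction d with
  | nil => intro r acc; simp
  | cons x d ih =>
    intro r acc
    simp only [List.foldl_cons, List.length_cons, List.range_succ_eq_map, List.map_cons,
      List.map_map, List.take_succ_cons, List.sum_cons, List.take_zero, List.sum_nil, add_zero]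
    rw [ih, List.append_assoc, List.singleton_append]
    congr 2
    apply List.map_congr_left
    intro a _
    simp only [Function.comp_def, Nat.succ_eq_add_one]
    split_ifs with h1 h2 <;> first | rfl | omega

theorem alt_eq (fn bs be : List Int) :
    createBinary_alt fn bs be = (List.range fn.length).map
      (fun (k : Nat) => if 0 < ((bs.zip be).countP (fun p =>
          decide (max p.1 0 ≤ (k : Int) ∧ (k : Int) ≤ min p.2 ((fn.length : Int) - 1))))
        then (1 : Int) else 0) := by
  unfold createBinary_alt
  obtain ⟨hlen, hsum⟩ := diffB fn.length (bs.zip be)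
    (List.replicate (fn.length + 1) (0 : Int)) (by simp)
  rw [scanB, List.nil_append, List.length_take, hlen,
    show min fn.length (fn.length + 1) = fn.length by omega]
  apply List.map_congr_left
  intro k hk
  rw [List.mem_range] at hk
  rw [List.take_take, show min (k + 1) fn.length = k + 1 by omega, hsum k hk,
    show ((List.replicate (fn.length + 1) (0 : Int)).take (k + 1)) = List.replicate (k + 1) 0 by
      rw [List.take_replicate]; congr 1; omega]
  have hs : (List.replicate (k + 1) (0 : Int)).sum = 0 := by simp
  rw [hs]
  split_ifs with h1 h2 <;> first | rfl | omega

theorem createBinary_spec : Claim_equal_createBinary := by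
  unfold Claim_equal_createBinary
  intro fn bs be _ _
  unfold Spec_createBinary
  rw [A_eq_map fn bs be, alt_eq fn bs be, PySem.List.pyRange_zero_natCast fn.length,
    List.map_map]
  apply List.map_congr_left
  intro k hk
  rw [List.mem_range] at hk
  simp only [Function.comp_def]
  rw [PySem.List.pyRange_zero_natCast bs.length, List.any_map]
  simp only [Function.comp_def]
  simp only [anyA_range (k : Int) bs be]
  have hiff : (zipHit bs be (k : Int) = true)
      ↔ 0 < ((bs.zip be).countP (fun p =>
          decide (max p.1 0 ≤ (k : Int) ∧ (k : Int) ≤ min p.2 ((fn.length : Int) - 1)))) := by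
    rw [zipHit, List.any_eq_true, List.countP_pos_iff]
    constructor
    · rintro ⟨p, hp, hdec⟩
      refine ⟨p, hp, ?_⟩
      simp only [decide_eq_true_eq] at hdec ⊢
      omega
    · rintro ⟨p, hp, hdec⟩
      refine ⟨p, hp, ?_⟩
      simp only [decide_eq_true_eq] at hdec ⊢
      omega
  by_cases h : zipHit bs be (k : Int) = true
  · rw [if_pos h, if_pos (hiff.mp h)]
  · rw [if_neg h, if_neg (fun hc => h (hiff.mpr hc))]
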